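-- pv_equiv track=rewrite | github.com/bigbio/pgatk | pgatk/proteogenomics/blast_get_position.py | peptide_blast_protein
-- ===== SOURCE A (Python) =====
-- def get_details(fasta: str, peptide: str) -> list:
--     res = []
--     i = 0
--     j = 0
--     for AA1, AA2 in zip(fasta, peptide):
--         i += 1
--         j += 1
--         if AA1 == AA2:
--             continue
--         else:
--             res.append(str(i) + "|" + AA1 + ">" + AA2)
--     return res
--
-- def peptide_blast_protein(fasta: str, peptide: str) -> list:
--     length = len(peptide)
--     mismatch = []
--     if len(fasta) >= length:
--         for i in range(len(fasta) - length + 1):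
--             window = fasta[i:i + length]
--             details = get_details(window, peptide)
--             if len(details) == 1:
--                 mismatch = details
--                 break
--     return mismatch
-- ===== SOURCE B (Python) =====
-- def peptide_blast_protein(fasta: str, peptide: str) -> list:
--     # Bit-parallel Shift-And with one allowed substitution (Baeza-Yates/Gonnet
--     # style): v0 tracks exact prefix matches of the peptide ending at j, v1
--     # tracks prefix matches with at most one mismatch; window fires when v1
--     # accepts but v0 does not (exactly one mismatch).
--     m = len(peptide)
--     if m == 0 or len(fasta) < m:
--         return []
--     masks = {}
--     for k, c in enumerate(peptide):
--         masks[c] = masks.get(c, 0) | (1 << k)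
--     accept = 1 << (m - 1)
--     v0 = 0
--     v1 = 0
--     for j, c in enumerate(fasta):
--         cm = masks.get(c, 0)
--         v0s = (v0 << 1) | 1
--         v1 = ((v1 << 1) | 1) & cm | v0s
--         v0 = v0s & cm
--         if (v1 & accept) and not (v0 & accept):
--             i = j - m + 1
--             for k in range(m):
--                 if fasta[i + k] != peptide[k]:
--                     return [str(k + 1) + "|" + fasta[i + k] + ">" + peptide[k]]
--     return []
-- ===== Notes on version B (the rewrite author's own statement) =====
-- stated objective: alternative
-- what changed: A slices out every window and builds its full mismatch-detail list; B runs a bit-parallel Shift-And scan with one allowed substitution (per-character mask table, two bit vectors updated once per fasta character; a window fires when the 1-error vector accepts but the exact vector does not), then reads the single mismatch off the one firing window; it trades A's per-window list building for big-integer bit operations, which wins for short peptides but not for peptides of length comparable to the text.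
import Mathlib
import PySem

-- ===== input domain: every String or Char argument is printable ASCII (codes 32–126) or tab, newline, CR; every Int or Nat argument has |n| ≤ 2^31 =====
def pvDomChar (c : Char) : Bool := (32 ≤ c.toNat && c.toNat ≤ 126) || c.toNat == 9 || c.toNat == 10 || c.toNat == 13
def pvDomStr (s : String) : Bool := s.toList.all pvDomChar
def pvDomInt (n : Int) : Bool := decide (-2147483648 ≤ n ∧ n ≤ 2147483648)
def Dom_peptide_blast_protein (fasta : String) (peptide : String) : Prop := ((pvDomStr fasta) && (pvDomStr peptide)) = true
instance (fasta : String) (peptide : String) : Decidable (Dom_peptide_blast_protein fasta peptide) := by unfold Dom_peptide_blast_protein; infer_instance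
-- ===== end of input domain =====

-- B replaces A's per-window mismatch listing by a bit-parallel Shift-And scan with one
-- allowed substitution (two bit vectors updated once per fasta character); same return
-- value, proved equal below.  len(s) is ported as s.toList.length (exact).

-- ===== PORT A =====
-- get_details: the zip loop with the 1-based counter i (j is unused for the result).
def getDetailsGo : List (Char × Char) → Nat → List String
  | [], _ => []
  | (a, b) :: rest, i =>
    if a = b then getDetailsGo rest (i + 1)
    else (PySem.Int.toStr ((i + 1 : Nat) : Int) ++ "|" ++ String.singleton a ++ ">" ++ String.singleton b)
           :: getDetailsGo rest (i + 1)

def get_details (fasta : String) (peptide : String) : List String :=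
  getDetailsGo (fasta.toList.zip peptide.toList) 0

-- the for-loop with break; range(len(fasta)-length+1) is over Nat, exact under the guard len(fasta) ≥ length
def blastGo (fasta : String) (peptide : String) (length : Nat) : List Nat → List String
  | [] => []
  | i :: rest =>
    if (get_details (PySem.Str.slice fasta (some (i : Int)) (some ((i : Int) + (length : Int)))) peptide).length = 1
    then get_details (PySem.Str.slice fasta (some (i : Int)) (some ((i : Int) + (length : Int)))) peptide
    else blastGo fasta peptide length rest

def peptide_blast_protein (fasta : String) (peptide : String) : List String :=
  if fasta.toList.length ≥ peptide.toList.length then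
    blastGo fasta peptide peptide.toList.length
      (List.range (fasta.toList.length - peptide.toList.length + 1))
  else []

-- ===== PORT B =====
-- masks[c] = masks.get(c, 0) | (1 << k) over enumerate(peptide); enumerate indices are ≥ 0, so k.toNat is exact
def buildMasks : List (Int × Char) → PySem.Dict Char Nat → PySem.Dict Char Nat
  | [], d => d
  | (k, c) :: rest, d => buildMasks rest (d.insert c ((d.getD c 0) ||| (1 <<< k.toNat)))

-- the inner recovery loop 'for k in range(m): if fasta[i+k] != peptide[k]: return [...]';
-- every index it reads is in range whenever the loop is reached (guard fires only with a full window)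
def recoverGo (fasta : String) (peptide : String) (i : Int) : List Nat → Option String
  | [] => none
  | k :: rest =>
    if PySem.List.pyGetD fasta.toList (i + (k : Int)) ' ' ≠ PySem.List.pyGetD peptide.toList (k : Int) ' '
    then some (PySem.Int.toStr ((k + 1 : Nat) : Int) ++ "|"
                 ++ String.singleton (PySem.List.pyGetD fasta.toList (i + (k : Int)) ' ')
                 ++ ">" ++ String.singleton (PySem.List.pyGetD peptide.toList (k : Int) ' '))
    else recoverGo fasta peptide i rest

-- the main scan over enumerate(fasta): v0 = exact prefix matches, v1 = ≤1-mismatch prefix matches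
def altLoop (fasta : String) (peptide : String) (masks : PySem.Dict Char Nat) (m : Nat)
    (accept : Nat) : Nat → Nat → List (Int × Char) → List String
  | _, _, [] => []
  | v0, v1, (j, c) :: rest =>
    let cm := masks.getD c 0
    let v0s := (v0 <<< 1) ||| 1
    let v1' := (((v1 <<< 1) ||| 1) &&& cm) ||| v0s
    let v0' := v0s &&& cm
    if (v1' &&& accept) ≠ 0 ∧ (v0' &&& accept) = 0 then
      match recoverGo fasta peptide (j - (m : Int) + 1) (List.range m) with
      | some s => [s]
      | none => altLoop fasta peptide masks m accept v0' v1' rest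
    else altLoop fasta peptide masks m accept v0' v1' rest

def peptide_blast_protein_alt (fasta : String) (peptide : String) : List String :=
  if peptide.toList.length = 0 ∨ fasta.toList.length < peptide.toList.length then []
  else
    altLoop fasta peptide
      (buildMasks (PySem.List.enumerate peptide.toList 0) PySem.Dict.empty)
      peptide.toList.length (1 <<< (peptide.toList.length - 1)) 0 0
      (PySem.List.enumerate fasta.toList 0)

-- ===== PRECONDITION & SPEC =====
def Spec_peptide_blast_protein (fasta : String) (peptide : String) (out : List String) : Prop := out = peptide_blast_protein_alt fasta peptide
instance (fasta : String) (peptide : String) (out : List String) : Decidable (Spec_peptide_blast_protein fasta peptide out) := by unfold Spec_peptide_blast_protein; infer_instance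

-- ===== CLAIM (what is proved, stated in full; the proofs are below) =====
def Claim_equal_peptide_blast_protein : Prop := ∀ (fasta : String) (peptide : String), Dom_peptide_blast_protein fasta peptide → Spec_peptide_blast_protein fasta peptide (peptide_blast_protein fasta peptide)

-- ===== LEMMAS AND PROOFS =====

-- Hamming distance of two equal-length windows (zip-truncating)
def ham : List Char → List Char → Nat
  | a :: as, b :: bs => (if a = b then 0 else 1) + ham as bs
  | _, _ => 0

-- first mismatching pair, with its 0-based position
def firstDiff : List (Char × Char) → Nat → Option (Nat × Char × Char)
  | [], _ => none
  | (a, b) :: rest, k => if a ≠ b then some (k, a, b) else firstDiff rest (k + 1)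

def detailStr (k : Nat) (a b : Char) : String :=
  PySem.Int.toStr ((k + 1 : Nat) : Int) ++ "|" ++ String.singleton a ++ ">" ++ String.singleton b

-- common reference scan, indexed by window END j
def findEnd (fl p : List Char) (m : Nat) : List Nat → List String
  | [] => []
  | j :: rest =>
    if m ≤ j + 1 ∧ ham ((fl.drop (j + 1 - m)).take m) p = 1 then
      match firstDiff ((((fl.drop (j + 1 - m)).take m)).zip p) 0 with
      | some (k, a, b) => [detailStr k a b]
      | none => []
    else findEnd fl p m rest

lemma getDetailsGo_length (w q : List Char) (c : Nat) :
    (getDetailsGo (w.zip q) c).length = ham w q := by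
  induction w generalizing q c with
  | nil => cases q <;> simp [getDetailsGo, ham]
  | cons a as ih =>
    cases q with
    | nil => simp [getDetailsGo, ham]
    | cons b bs =>
      by_cases hab : a = b <;> simp [getDetailsGo, ham, hab, ih] <;> omega

lemma getDetailsGo_of_ham_one (w q : List Char) (c : Nat) (h : ham w q = 1) :
    ∃ k a b, firstDiff (w.zip q) c = some (k, a, b) ∧
      getDetailsGo (w.zip q) c = [detailStr k a b] := by
  induction w generalizing q c with
  | nil => cases q <;> simp [ham] at h
  | cons a as ih =>
    cases q with
    | nil => simp [ham] at h
    | cons b bs =>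
      by_cases hab : a = b
      · have h' : ham as bs = 1 := by simp [ham, hab] at h; omega
        obtain ⟨k, x, y, h1, h2⟩ := ih bs (c + 1) h'
        exact ⟨k, x, y, by simp [firstDiff, hab, h1], by simp [getDetailsGo, hab, h2]⟩
      · have h0 : ham as bs = 0 := by simp [ham, hab] at h; omega
        have hnil : getDetailsGo (as.zip bs) (c + 1) = [] := by
          have := getDetailsGo_length as bs (c + 1)
          rw [h0] at this
          exact List.length_eq_zero_iff.mp this
        exact ⟨c, a, b, by simp [firstDiff, hab],
          by simp [getDetailsGo, hab, hnil, detailStr]⟩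

-- A's window slice as a list
lemma window_toList (fasta : String) (i m : Nat) :
    (PySem.Str.slice fasta (some (i : Int)) (some ((i : Int) + (m : Int)))).toList
      = (fasta.toList.drop i).take m := by
  rw [PySem.Str.toList_slice]
  simp [PySem.List.slice_natCast_add]

-- Bool fact used by the bit lemmas
lemma testBit_one_pv (k : Nat) : (1 : Nat).testBit k = decide (k = 0) := by
  cases k with
  | zero => decide
  | succ n => simp [Nat.testBit_succ]

-- A with an empty peptide never fires its branch
lemma blastGo_len_zero (fasta peptide : String) (l : List Nat) :
    blastGo fasta peptide 0 l = [] := by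
  induction l with
  | nil => rfl
  | cons i rest ih =>
    have hw : (PySem.Str.slice fasta (some (i : Int)) (some ((i : Int) + ((0:Nat) : Int)))).toList
        = (fasta.toList.drop i).take 0 := window_toList fasta i 0
    simp only [blastGo, get_details, hw]
    simp [getDetailsGo, ih]

-- A's loop is the reference scan over window ENDS i + (m-1)
lemma blastGo_eq_findEnd (fasta peptide : String) (m : Nat) (hm : 1 ≤ m)
    (hmp : m = peptide.toList.length) (l : List Nat) :
    blastGo fasta peptide m l
      = findEnd fasta.toList peptide.toList m (l.map (· + (m - 1))) := by
  induction l with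
  | nil => rfl
  | cons i rest ih =>
    have hj : i + (m - 1) + 1 - m = i := by omega
    have hw := window_toList fasta i m
    have hlen := getDetailsGo_length ((fasta.toList.drop i).take m) peptide.toList 0
    simp only [blastGo, get_details, hw, List.map_cons, findEnd, hj]
    by_cases hh : ham ((fasta.toList.drop i).take m) peptide.toList = 1
    · obtain ⟨k, a, b, hfd, hgd⟩ :=
        getDetailsGo_of_ham_one ((fasta.toList.drop i).take m) peptide.toList 0 hh
      rw [if_pos (by rw [hlen, hh]), if_pos ⟨by omega, hh⟩, hgd, hfd]
    · rw [if_neg (by rw [hlen]; exact hh), if_neg (by rintro ⟨-, h⟩; exact hh h), ih]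

-- ends with j + 1 < m never fire
lemma findEnd_skip (fl p : List Char) (m : Nat) (l1 l2 : List Nat)
    (h : ∀ j ∈ l1, j + 1 < m) :
    findEnd fl p m (l1 ++ l2) = findEnd fl p m l2 := by
  induction l1 with
  | nil => rfl
  | cons j rest ih =>
    have := h j (by simp)
    simp only [List.cons_append, findEnd]
    rw [if_neg (by rintro ⟨h1, -⟩; omega), ih (fun x hx => h x (by simp [hx]))]

-- the mask table: bit k of masks[c] says peptide[k] == c
lemma buildMasks_getD_testBit (p : List Char) (s : Nat) (d : PySem.Dict Char Nat)
    (c : Char) (k : Nat) :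
    ((buildMasks (PySem.List.enumerate p (s : Int)) d).getD c 0).testBit k
      = ((d.getD c 0).testBit k || (decide (s ≤ k) && decide (p[k - s]? = some c))) := by
  induction p generalizing s d with
  | nil => simp [PySem.List.enumerate_nil, buildMasks]
  | cons x xs ih =>
    rw [PySem.List.enumerate_cons]
    have hc1 : ((s : Int) + 1) = ((s + 1 : Nat) : Int) := by push_cast; ring
    simp only [buildMasks, Int.toNat_natCast, hc1]
    rw [ih (s + 1) _]
    rw [PySem.Dict.getD_insert]
    by_cases hcx : c = x
    · subst hcx
      rw [if_pos rfl, Nat.testBit_or, Nat.one_shiftLeft, Nat.testBit_two_pow]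
      rcases Nat.lt_trichotomy k s with hks | hks | hks
      · have h1 : ¬ s ≤ k := by omega
        have h2 : ¬ s + 1 ≤ k := by omega
        simp [h1, h2, Nat.ne_of_gt hks]
      · subst hks
        have h2 : ¬ k + 1 ≤ k := by omega
        simp [h2, Nat.sub_self]
      · have h1 : s ≤ k := by omega
        have h2 : s + 1 ≤ k := by omega
        have h3 : k - s = (k - (s + 1)) + 1 := by omega
        simp [h1, h2, h3, Nat.ne_of_lt hks, List.getElem?_cons_succ]
    · rw [if_neg hcx]
      rcases Nat.lt_trichotomy k s with hks | hks | hks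
      · have h1 : ¬ s ≤ k := by omega
        have h2 : ¬ s + 1 ≤ k := by omega
        simp [h1, h2]
      · subst hks
        have h2 : ¬ k + 1 ≤ k := by omega
        simp [h2, Nat.sub_self, show ¬ (x = c) from fun h => hcx h.symm]
      · have h1 : s ≤ k := by omega
        have h2 : s + 1 ≤ k := by omega
        have h3 : k - s = (k - (s + 1)) + 1 := by omega
        simp [h1, h2, h3, List.getElem?_cons_succ]

lemma masks_testBit (p : List Char) (c : Char) (k : Nat) :
    ((buildMasks (PySem.List.enumerate p 0) PySem.Dict.empty).getD c 0).testBit k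
      = decide (p[k]? = some c) := by
  have h := buildMasks_getD_testBit p 0 PySem.Dict.empty c k
  simpa [PySem.Dict.getD_empty] using h

-- ham facts
lemma ham_append (w1 w2 q1 q2 : List Char) (h : w1.length = q1.length) :
    ham (w1 ++ w2) (q1 ++ q2) = ham w1 q1 + ham w2 q2 := by
  induction w1 generalizing q1 with
  | nil =>
    cases q1 with
    | nil => simp [ham]
    | cons b bs => simp at h
  | cons a as ih =>
    cases q1 with
    | nil => simp at h
    | cons b bs =>
      simp only [List.cons_append, ham, ih bs (by simpa using h)]
      omega

lemma ham_reverse (w q : List Char) (h : w.length = q.length) :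
    ham w.reverse q.reverse = ham w q := by
  induction w generalizing q with
  | nil => cases q with
    | nil => rfl
    | cons b bs => simp at h
  | cons a as ih =>
    cases q with
    | nil => simp at h
    | cons b bs =>
      have h' : as.length = bs.length := by simpa using h
      simp only [List.reverse_cons]
      rw [ham_append as.reverse [a] bs.reverse [b] (by simp [h']), ih bs h']
      simp [ham]
      omega

lemma ham_take_succ (p r : List Char) (c : Char) (k : Nat) (hk : k < p.length) :
    ham ((c :: r).take (k + 1)) ((p.take (k + 1)).reverse)
      = (if c = p[k] then 0 else 1) + ham (r.take k) ((p.take k).reverse) := by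
  have h1 : (p.take (k + 1)).reverse = p[k] :: (p.take k).reverse := by
    rw [List.take_succ_eq_append_getElem hk, List.reverse_append]
    rfl
  rw [List.take_succ_cons, h1]
  simp [ham]

-- the two loop invariants of B's scan; r is the processed prefix, most recent char first
def Inv0 (p r : List Char) (v : Nat) : Prop :=
  ∀ k, v.testBit k = (decide (k < p.length) && decide (k < r.length) &&
        decide (ham (r.take (k + 1)) ((p.take (k + 1)).reverse) = 0))

def Inv1 (p r : List Char) (v : Nat) : Prop :=
  ∀ k, k < p.length → v.testBit k = (decide (k < r.length) &&
        decide (ham (r.take (k + 1)) ((p.take (k + 1)).reverse) ≤ 1))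

lemma inv0_zero (p : List Char) : Inv0 p [] 0 := by
  intro k; simp [Nat.zero_testBit]

lemma inv1_zero (p : List Char) : Inv1 p [] 0 := by
  intro k _; simp [Nat.zero_testBit]

lemma step_inv0 (p r : List Char) (v0 : Nat) (c : Char) (cm : Nat)
    (hcm : ∀ k, cm.testBit k = decide (p[k]? = some c))
    (h0 : Inv0 p r v0) :
    Inv0 p (c :: r) (((v0 <<< 1) ||| 1) &&& cm) := by
  intro k
  rw [Nat.testBit_and, Nat.testBit_or, Nat.testBit_shiftLeft, testBit_one_pv, hcm]
  cases k with
  | zero =>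
    cases p with
    | nil => simp
    | cons p0 ps =>
      simp only [List.take_succ_cons, List.take_zero]
      by_cases hc : c = p0 <;> simp [ham, hc] <;> simp [eq_comm, hc]
  | succ k =>
    simp only [Nat.add_sub_cancel]
    rw [h0 k]
    by_cases hk : k + 1 < p.length
    · rw [ham_take_succ p r c (k + 1) hk]
      have hget : (p[k+1]? = some c) ↔ (c = p[k+1]) := by
        rw [List.getElem?_eq_getElem hk]
        exact ⟨fun h => by injection h with h; rw [h], fun h => by rw [h]⟩
      by_cases hc : c = p[k+1] <;>
        by_cases hr : k < r.length <;>
        by_cases hh : ham (r.take (k + 1)) ((p.take (k + 1)).reverse) = 0 <;>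
        simp [hget, hc, hr, hh, Nat.lt_of_succ_lt hk, hk, Nat.succ_lt_succ_iff, eq_comm] <;> omega
    · have : p[k+1]? = none := List.getElem?_eq_none (by omega)
      simp [this, hk]

lemma step_inv1 (p r : List Char) (v0 v1 : Nat) (c : Char) (cm : Nat)
    (hcm : ∀ k, cm.testBit k = decide (p[k]? = some c))
    (h0 : Inv0 p r v0) (h1 : Inv1 p r v1) :
    Inv1 p (c :: r) ((((v1 <<< 1) ||| 1) &&& cm) ||| ((v0 <<< 1) ||| 1)) := by
  intro k hkp
  rw [Nat.testBit_or, Nat.testBit_and, Nat.testBit_or, Nat.testBit_shiftLeft,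
    Nat.testBit_or, Nat.testBit_shiftLeft, testBit_one_pv, hcm]
  cases k with
  | zero =>
    cases p with
    | nil => simp at hkp
    | cons p0 ps =>
      simp only [List.take_succ_cons, List.take_zero]
      by_cases hc : c = p0 <;> simp [ham, hc]
  | succ k =>
    simp only [Nat.add_sub_cancel]
    have hk : k < p.length := by omega
    rw [h1 k hk, h0 k]
    rw [ham_take_succ p r c (k + 1) hkp]
    have hget : (p[k+1]? = some c) ↔ (c = p[k+1]) := by
      rw [List.getElem?_eq_getElem hkp]
      exact ⟨fun h => by injection h with h; rw [h], fun h => by rw [h]⟩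
    by_cases hc : c = p[k+1] <;>
      by_cases hr : k < r.length <;>
      by_cases hh0 : ham (r.take (k + 1)) ((p.take (k + 1)).reverse) = 0 <;>
      by_cases hh1 : ham (r.take (k + 1)) ((p.take (k + 1)).reverse) ≤ 1 <;>
      simp [hget, hc, hr, hh0, hh1, hk, hkp, Nat.succ_lt_succ_iff, eq_comm] <;> omega

-- the firing test reads exactly "this window has hamming distance 1"
lemma fire_iff (p r : List Char) (v0 v1 m : Nat) (hm : 1 ≤ m) (hmp : m = p.length)
    (h0 : Inv0 p r v0) (h1 : Inv1 p r v1) :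
    ((v1 &&& (1 <<< (m - 1)) ≠ 0) ∧ (v0 &&& (1 <<< (m - 1)) = 0)) ↔
      (m ≤ r.length ∧ ham (r.take m) p.reverse = 1) := by
  have hb1 := h1 (m - 1) (by omega)
  have hb0 := h0 (m - 1)
  have hms : m - 1 + 1 = m := by omega
  have hpt : p.take m = p := by rw [hmp]; exact List.take_length
  rw [hms, hpt] at hb1 hb0
  rw [Nat.one_shiftLeft, Nat.and_two_pow, Nat.and_two_pow, hb1, hb0]
  have h2 : (2 : Nat) ^ (m - 1) ≠ 0 := by positivity
  by_cases hr : m - 1 < r.length <;>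
    by_cases hh0 : ham (r.take m) p.reverse = 0 <;>
    by_cases hh1 : ham (r.take m) p.reverse ≤ 1 <;>
    simp [hr, hh0, hh1, h2, show m - 1 < p.length from by omega] <;>
    omega

-- the recovery loop reports the first mismatch of the window
lemma recoverGo_eq (fasta peptide : String) (i0 : Nat) :
    ∀ (t k0 : Nat), i0 + k0 + t ≤ fasta.toList.length → k0 + t ≤ peptide.toList.length →
    recoverGo fasta peptide (i0 : Int) (List.range' k0 t)
      = (firstDiff (((fasta.toList.drop (i0 + k0)).take t).zip (peptide.toList.drop k0)) k0).map
          (fun x => detailStr x.1 x.2.1 x.2.2) := by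
  intro t
  induction t with
  | zero => intro k0 _ _; simp [recoverGo, firstDiff]
  | succ t ih =>
    intro k0 hf hp
    have hif : i0 + k0 < fasta.toList.length := by omega
    have hkp : k0 < peptide.toList.length := by omega
    rw [List.range'_succ]
    have hcast : (i0 : Int) + (k0 : Int) = ((i0 + k0 : Nat) : Int) := by push_cast; ring
    have hgf : PySem.List.pyGetD fasta.toList ((i0 : Int) + (k0 : Int)) ' '
        = fasta.toList[i0 + k0] := by
      rw [hcast, PySem.List.pyGetD_natCast]
      exact List.getD_eq_getElem _ _ hif
    have hgp : PySem.List.pyGetD peptide.toList ((k0 : Int)) ' ' = peptide.toList[k0] := by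
      rw [PySem.List.pyGetD_natCast]
      exact List.getD_eq_getElem _ _ hkp
    have hdf : fasta.toList.drop (i0 + k0) = fasta.toList[i0 + k0] :: fasta.toList.drop (i0 + k0 + 1) :=
      List.drop_eq_getElem_cons hif
    have hdp : peptide.toList.drop k0 = peptide.toList[k0] :: peptide.toList.drop (k0 + 1) :=
      List.drop_eq_getElem_cons hkp
    rw [hdf, hdp]
    simp only [recoverGo, hgf, hgp, List.take_succ_cons, List.zip_cons_cons, firstDiff]
    by_cases hne : fasta.toList[i0 + k0] = peptide.toList[k0]
    · rw [if_neg (by simp [hne]), if_neg (by simp [hne])]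
      have := ih (k0 + 1) (by omega) (by omega)
      rw [show i0 + (k0 + 1) = i0 + k0 + 1 from by omega] at this
      exact this
    · rw [if_pos (by simp [hne]), if_pos (by simp [hne])]
      simp [detailStr]

-- B's scan is the reference scan over all window ends
lemma altLoop_eq_findEnd (fasta peptide : String) (m : Nat) (hm : 1 ≤ m)
    (hmp : m = peptide.toList.length) (masks : PySem.Dict Char Nat)
    (hcm : ∀ c k, (masks.getD c 0).testBit k = decide (peptide.toList[k]? = some c)) :
    ∀ (rem r : List Char) (v0 v1 : Nat),
      fasta.toList = r.reverse ++ rem →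
      Inv0 peptide.toList r v0 → Inv1 peptide.toList r v1 →
      altLoop fasta peptide masks m (1 <<< (m - 1)) v0 v1
          (PySem.List.enumerate rem (r.length : Int))
        = findEnd fasta.toList peptide.toList m (List.range' r.length rem.length) := by
  intro rem
  induction rem with
  | nil => intro r v0 v1 _ _ _; simp [PySem.List.enumerate_nil, altLoop, findEnd]
  | cons c rem' ih =>
    intro r v0 v1 hfl h0 h1
    rw [PySem.List.enumerate_cons, List.length_cons, List.range'_succ]
    set cm := masks.getD c 0 with hcmdef
    have hcmb : ∀ k, cm.testBit k = decide (peptide.toList[k]? = some c) := fun k => hcm c k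
    have h0' := step_inv0 peptide.toList r v0 c cm hcmb h0
    have h1' := step_inv1 peptide.toList r v0 v1 c cm hcmb h0 h1
    have hfl' : fasta.toList = (c :: r).reverse ++ rem' := by
      rw [hfl]; simp
    have hfire := fire_iff peptide.toList (c :: r) (((v0 <<< 1) ||| 1) &&& cm)
      ((((v1 <<< 1) ||| 1) &&& cm) ||| ((v0 <<< 1) ||| 1)) m hm hmp h0' h1'
    have hlen' : (c :: r).length = r.length + 1 := rfl
    -- window identification, valid when the guard fires (m ≤ r.length + 1)
    have hwin : m ≤ r.length + 1 →
        ham ((c :: r).take m) peptide.toList.reverse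
          = ham ((fasta.toList.drop (r.length + 1 - m)).take m) peptide.toList := by
      intro hmr
      have hLn : r.length + 1 ≤ fasta.toList.length := by
        rw [hfl', List.length_append, List.length_reverse, List.length_cons]
        omega
      have hcr : (c :: r) = (fasta.toList.take (r.length + 1)).reverse := by
        rw [hfl']
        rw [List.take_append_of_le_length (by simp)]
        rw [show r.length + 1 = ((c :: r).reverse).length by simp]
        rw [List.take_length, List.reverse_reverse]
      have hlt : (fasta.toList.take (r.length + 1)).length = r.length + 1 := by
        rw [List.length_take]; omega
      have hsub : r.length + 1 - (r.length + 1 - m) = m := by omega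
      rw [hcr, List.take_reverse, hlt, List.drop_take, hsub]
      apply ham_reverse
      rw [List.length_take, List.length_drop]
      omega
    have hLn : r.length + 1 ≤ fasta.toList.length := by
      rw [hfl', List.length_append, List.length_reverse, List.length_cons]
      omega
    have hcond : ((((((v1 <<< 1) ||| 1) &&& cm) ||| ((v0 <<< 1) ||| 1)) &&& (1 <<< (m - 1)) ≠ 0) ∧
                  ((((v0 <<< 1) ||| 1) &&& cm) &&& (1 <<< (m - 1)) = 0)) ↔
        (m ≤ r.length + 1 ∧
          ham ((fasta.toList.drop (r.length + 1 - m)).take m) peptide.toList = 1) := by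
      rw [hfire]
      constructor
      · rintro ⟨ha, hb⟩
        exact ⟨by simpa using ha, by rw [← hwin (by simpa using ha)]; exact hb⟩
      · rintro ⟨ha, hb⟩
        exact ⟨by simpa using ha, by rw [hwin ha]; exact hb⟩
    simp only [altLoop, findEnd]
    by_cases hfi : m ≤ r.length + 1 ∧
        ham ((fasta.toList.drop (r.length + 1 - m)).take m) peptide.toList = 1
    · rw [if_pos (hcond.mpr hfi), if_pos hfi]
      obtain ⟨k, a, b, hfd, -⟩ := getDetailsGo_of_ham_one _ peptide.toList 0 hfi.2
      have hio : ((r.length : Int) - (m : Int) + 1) = ((r.length + 1 - m : Nat) : Int) := by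
        have := hfi.1; push_cast; omega
      have hrec := recoverGo_eq fasta peptide (r.length + 1 - m) m 0
        (by omega) (by omega)
      simp only [Nat.add_zero, List.drop_zero] at hrec
      rw [hio, List.range_eq_range', hrec, hfd]
      rfl
    · rw [if_neg (by rw [hcond]; exact hfi), if_neg hfi]
      have hrest := ih (c :: r) (((v0 <<< 1) ||| 1) &&& cm)
        ((((v1 <<< 1) ||| 1) &&& cm) ||| ((v0 <<< 1) ||| 1)) hfl' h0' h1'
      have hc2 : (((c :: r).length : Nat) : Int) = (r.length : Int) + 1 := by
        simp
      rw [hc2] at hrest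
      exact hrest

-- ===== VERDICT (by name: the statement is the Claim_ definition above) =====
lemma alt_eq_findEnd_top (fasta peptide : String) (hm : 1 ≤ peptide.toList.length)
    (hnm : peptide.toList.length ≤ fasta.toList.length) :
    peptide_blast_protein_alt fasta peptide
      = findEnd fasta.toList peptide.toList peptide.toList.length
          (List.range' 0 fasta.toList.length) := by
  unfold peptide_blast_protein_alt
  rw [if_neg (by omega)]
  have h := altLoop_eq_findEnd fasta peptide peptide.toList.length hm rfl
    (buildMasks (PySem.List.enumerate peptide.toList 0) PySem.Dict.empty)
    (fun c k => masks_testBit peptide.toList c k)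
    fasta.toList [] 0 0 (by simp) (inv0_zero _) (inv1_zero _)
  simpa using h

theorem peptide_blast_protein_spec : Claim_equal_peptide_blast_protein := by
  intro fasta peptide _
  unfold Spec_peptide_blast_protein
  by_cases hm0 : peptide.toList.length = 0
  · unfold peptide_blast_protein peptide_blast_protein_alt
    rw [if_pos (by omega), if_pos (by omega), hm0, blastGo_len_zero]
  · by_cases hnm : fasta.toList.length < peptide.toList.length
    · unfold peptide_blast_protein peptide_blast_protein_alt
      rw [if_neg (by omega), if_pos (by omega)]
    · have hm : 1 ≤ peptide.toList.length := by omega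
      rw [alt_eq_findEnd_top fasta peptide hm (by omega)]
      unfold peptide_blast_protein
      rw [if_pos (by omega)]
      rw [blastGo_eq_findEnd fasta peptide peptide.toList.length hm rfl]
      have hsplit : List.range' 0 fasta.toList.length
          = List.range (peptide.toList.length - 1)
            ++ (List.range (fasta.toList.length - peptide.toList.length + 1)).map
                ((peptide.toList.length - 1) + ·) := by
        rw [← List.range_eq_range']
        conv_lhs => rw [show fasta.toList.length
            = (peptide.toList.length - 1) + (fasta.toList.length - peptide.toList.length + 1) from by omega]
        exact List.range_add
      rw [hsplit, findEnd_skip _ _ _ _ _ (fun j hj => by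
        have := List.mem_range.mp hj; omega)]
      congr 1
      exact List.map_congr_left (fun i _ => by omega)
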